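-- pv_equiv track=rewrite | github.com/gridsingularity/gsy-e | src/d3a/models/myco_matcher/pay_as_clear.py | _smooth_discrete_point_curve
-- ===== SOURCE A (Python) =====
-- def _smooth_discrete_point_curve(obj, limit, asc_order=True):
--     if asc_order:
--         for i in range(limit + 1):
--             obj[i] = obj.get(i, 0) + obj.get(i - 1, 0)
--     else:
--         for i in range((limit), 0, -1):
--             obj[i] = obj.get(i, 0) + obj.get(i + 1, 0)
--     return obj
-- ===== SOURCE B (Python) =====
-- def _dc_scan(vals):
--     """Divide-and-conquer prefix scan: split in half, scan each half
--     recursively, then add the left half's last partial sum to every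
--     element of the right half (the classic parallel-scan recursion)."""
--     n = len(vals)
--     if n <= 1:
--         return list(vals)
--     m = n // 2
--     left = _dc_scan(vals[:m])
--     right = _dc_scan(vals[m:])
--     off = left[-1]
--     return left + [off + r for r in right]
--
--
-- def _smooth_discrete_point_curve(obj, limit, asc_order=True):
--     if asc_order:
--         idxs = list(range(limit + 1))
--         base = obj.get(-1, 0)
--     else:
--         idxs = list(range(limit, 0, -1))
--         base = obj.get(limit + 1, 0)
--     vals = [obj.get(i, 0) for i in idxs]
--     sums = _dc_scan(vals)
--     for i, s in zip(idxs, sums):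
--         obj[i] = base + s
--     return obj
-- ===== Notes on version B (the rewrite author's own statement) =====
-- stated objective: alternative
-- what changed: Replaces A's sequential self-referential dict update (obj[i] read from the just-written obj[i-1]/obj[i+1]) with a divide-and-conquer parallel-style prefix scan over the snapshot of the original values (split in half, scan halves recursively, offset the right half by the left half's total), then a single write-back pass.
import Mathlib
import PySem

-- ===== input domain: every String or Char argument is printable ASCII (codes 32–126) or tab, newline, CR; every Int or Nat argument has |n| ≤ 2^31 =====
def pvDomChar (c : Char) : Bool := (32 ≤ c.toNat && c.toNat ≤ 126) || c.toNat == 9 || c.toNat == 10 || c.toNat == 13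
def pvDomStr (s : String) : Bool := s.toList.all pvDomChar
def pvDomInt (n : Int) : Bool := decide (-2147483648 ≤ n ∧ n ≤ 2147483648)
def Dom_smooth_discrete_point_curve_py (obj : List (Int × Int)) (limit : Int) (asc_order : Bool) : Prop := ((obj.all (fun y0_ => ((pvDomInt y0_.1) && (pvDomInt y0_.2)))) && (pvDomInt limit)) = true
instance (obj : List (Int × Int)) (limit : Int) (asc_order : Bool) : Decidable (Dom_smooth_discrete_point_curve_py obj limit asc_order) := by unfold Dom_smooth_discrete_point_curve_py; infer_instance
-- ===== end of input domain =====

-- B replaces A's sequential self-referential dict update with a divide-and-conquer prefix scan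
-- over a snapshot of the original values plus one write-back pass (same result, different
-- algorithm).  A mutates its dict argument in place; B performs the same mutation, and the
-- equivalence proved here is about the returned association list.

-- ===== PORT A =====
def smooth_discrete_point_curve_py (obj : List (Int × Int)) (limit : Int) (asc_order : Bool) : List (Int × Int) :=
  let d := PySem.Dict.mk obj
  let d :=
    if asc_order then
      (PySem.List.pyRange 0 (limit + 1) 1).foldl
        (fun d i => d.insert i (d.getD i 0 + d.getD (i - 1) 0)) d
    else
      (PySem.List.pyRange limit 0 (-1)).foldl
        (fun d i => d.insert i (d.getD i 0 + d.getD (i + 1) 0)) d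
  d.items

-- ===== PORT B =====
-- Divide-and-conquer prefix scan (Source B's _dc_scan).  Python's left[-1] is ported as
-- getLastD 0: exact here, since in the recursion `left` is always nonempty (m ≥ 1).
def pvDcScan (vals : List Int) : List Int :=
  if h : vals.length ≤ 1 then vals
  else
    let m := vals.length / 2
    let left := pvDcScan (vals.take m)
    let right := pvDcScan (vals.drop m)
    let off := left.getLastD 0
    left ++ right.map (fun r => off + r)
termination_by vals.length
decreasing_by
  · simp only [List.length_take]; omega
  · simp only [List.length_drop]; omega

def smooth_discrete_point_curve_py_alt (obj : List (Int × Int)) (limit : Int) (asc_order : Bool) : List (Int × Int) :=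
  let d := PySem.Dict.mk obj
  let idxs := if asc_order then PySem.List.pyRange 0 (limit + 1) 1 else PySem.List.pyRange limit 0 (-1)
  let base := if asc_order then d.getD (-1) 0 else d.getD (limit + 1) 0
  let vals := idxs.map (fun i => d.getD i 0)
  let sums := pvDcScan vals
  let d := (idxs.zip sums).foldl (fun d (p : Int × Int) => d.insert p.1 (base + p.2)) d
  d.items

-- ===== PRECONDITION & SPEC =====
def Spec_smooth_discrete_point_curve_py (obj : List (Int × Int)) (limit : Int) (asc_order : Bool) (out : List (Int × Int)) : Prop := out = smooth_discrete_point_curve_py_alt obj limit asc_order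
instance (obj : List (Int × Int)) (limit : Int) (asc_order : Bool) (out : List (Int × Int)) : Decidable (Spec_smooth_discrete_point_curve_py obj limit asc_order out) := by unfold Spec_smooth_discrete_point_curve_py; infer_instance

-- ===== CLAIM (what is proved, stated in full; the proofs are below) =====
def Claim_equal_smooth_discrete_point_curve_py : Prop := ∀ (obj : List (Int × Int)) (limit : Int) (asc_order : Bool), Dom_smooth_discrete_point_curve_py obj limit asc_order → Spec_smooth_discrete_point_curve_py obj limit asc_order (smooth_discrete_point_curve_py obj limit asc_order)

-- ===== LEMMAS AND PROOFS =====

/-- The index list `[a, a+δ, a+2δ, …]` of length `n`. -/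
def pvChain (a δ : Int) : Nat → List Int
  | 0 => []
  | n + 1 => a :: pvChain (a + δ) δ n

/-- Running sums of the dict values along an index list, seeded with `acc`. -/
def pvScan (d : PySem.Dict Int Int) (acc : Int) : List Int → List Int
  | [] => []
  | i :: is => (acc + d.getD i 0) :: pvScan d (acc + d.getD i 0) is

/-- Sequential prefix scan of a value list, seeded with `acc`. -/
def pvSeqScan (acc : Int) : List Int → List Int
  | [] => []
  | v :: vs => (acc + v) :: pvSeqScan (acc + v) vs

lemma pvChain_mem : ∀ (n : Nat) (a δ x : Int), x ∈ pvChain a δ n →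
    ∃ k : Nat, x = a + δ * k := by
  intro n
  induction n with
  | zero => intro a δ x h; simp [pvChain] at h
  | succ n ih =>
    intro a δ x h
    simp only [pvChain, List.mem_cons] at h
    rcases h with h | h
    · exact ⟨0, by simp [h]⟩
    · rcases ih (a + δ) δ x h with ⟨k, hk⟩
      refine ⟨k + 1, ?_⟩
      push_cast
      linarith [hk]

lemma pvChain_not_mem (a δ : Int) (hδ : δ = 1 ∨ δ = -1) (n : Nat) :
    a ∉ pvChain (a + δ) δ n := by
  intro h
  rcases pvChain_mem n (a + δ) δ a h with ⟨k, hk⟩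
  rcases hδ with h1 | h1 <;> subst h1 <;>
    simp only [one_mul, neg_one_mul] at hk <;> omega

lemma pvScan_insert (a v : Int) : ∀ (is : List Int) (d : PySem.Dict Int Int) (acc : Int),
    a ∉ is → pvScan (d.insert a v) acc is = pvScan d acc is := by
  intro is
  induction is with
  | nil => intro d acc _; simp [pvScan]
  | cons i is ih =>
    intro d acc h
    simp only [List.mem_cons, not_or] at h
    have hne : i ≠ a := fun he => h.1 he.symm
    simp only [pvScan, PySem.Dict.getD_insert, if_neg hne]
    rw [ih d _ h.2]

/-- A's self-referential fold equals inserting the running sums pointwise. -/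
lemma pvMain (δ : Int) (hδ : δ = 1 ∨ δ = -1) : ∀ (n : Nat) (a : Int) (d : PySem.Dict Int Int) (acc : Int),
    acc = d.getD (a - δ) 0 →
    (pvChain a δ n).foldl (fun d i => d.insert i (d.getD i 0 + d.getD (i - δ) 0)) d
      = ((pvChain a δ n).zip (pvScan d acc (pvChain a δ n))).foldl
          (fun d (p : Int × Int) => d.insert p.1 p.2) d := by
  intro n
  induction n with
  | zero => intro a d acc _; simp [pvChain]
  | succ n ih =>
    intro a d acc hacc
    simp only [pvChain, pvScan, List.zip_cons_cons, List.foldl_cons]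
    have hval : d.getD a 0 + d.getD (a - δ) 0 = acc + d.getD a 0 := by
      rw [hacc]; ring
    rw [hval]
    rw [← pvScan_insert a (acc + d.getD a 0) _ _ _ (pvChain_not_mem a δ hδ n)]
    exact ih (a + δ) (d.insert a (acc + d.getD a 0)) (acc + d.getD a 0)
      (by rw [show a + δ - δ = a by ring, PySem.Dict.getD_insert_self])

lemma pvRange_pos : ∀ (n : Nat) (a b : Int), (b - a).toNat = n →
    PySem.List.pyRange a b 1 = pvChain a 1 n := by
  intro n
  induction n with
  | zero =>
    intro a b h
    rw [PySem.List.pyRange_one_eq_nil (by omega)]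
    rfl
  | succ n ih =>
    intro a b h
    rw [PySem.List.pyRange_one_cons (by omega)]
    rw [ih (a + 1) b (by omega)]
    rfl

lemma pvRange_neg : ∀ (n : Nat) (a b : Int), (a - b).toNat = n →
    PySem.List.pyRange a b (-1) = pvChain a (-1) n := by
  intro n
  induction n with
  | zero =>
    intro a b h
    rw [PySem.List.pyRange_neg_one_eq_nil (by omega)]
    rfl
  | succ n ih =>
    intro a b h
    rw [PySem.List.pyRange_neg_one_cons (by omega)]
    simp only [pvChain]
    rw [show a + -1 = a - 1 by ring, ih (a - 1) b (by omega)]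

lemma pvScan_eq_seq (d : PySem.Dict Int Int) : ∀ (is : List Int) (acc : Int),
    pvScan d acc is = pvSeqScan acc (is.map (fun i => d.getD i 0)) := by
  intro is
  induction is with
  | nil => intro acc; simp [pvScan, pvSeqScan]
  | cons i is ih => intro acc; simp only [pvScan, List.map, pvSeqScan]; rw [ih]

lemma pvSeq_shift : ∀ (l : List Int) (acc : Int),
    pvSeqScan acc l = (pvSeqScan 0 l).map (fun s => acc + s) := by
  intro l
  induction l with
  | nil => intro acc; simp [pvSeqScan]
  | cons v vs ih =>
    intro acc
    simp only [pvSeqScan, List.map, zero_add]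
    rw [ih (acc + v), ih v, List.map_map]
    congr 1
    apply List.map_congr_left
    intro x _
    simp only [Function.comp]
    ring

lemma pvSeq_append : ∀ (a : List Int) (acc : Int) (b : List Int),
    pvSeqScan acc (a ++ b) = pvSeqScan acc a ++ pvSeqScan (acc + a.sum) b := by
  intro a
  induction a with
  | nil => intro acc b; simp [pvSeqScan]
  | cons v vs ih =>
    intro acc b
    simp only [List.cons_append, pvSeqScan, List.sum_cons]
    rw [ih (acc + v) b]
    simp [add_assoc]

lemma pvSeq_last : ∀ (l : List Int) (acc : Int),
    (pvSeqScan acc l).getLastD acc = acc + l.sum := by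
  intro l
  induction l with
  | nil => intro acc; simp [pvSeqScan]
  | cons v vs ih =>
    intro acc
    simp only [pvSeqScan, List.getLastD_cons, List.sum_cons]
    rw [ih (acc + v)]
    ring

/-- The divide-and-conquer scan computes the sequential prefix scan. -/
lemma pvDcScan_eq_seq_aux : ∀ (n : Nat) (l : List Int), l.length ≤ n → pvDcScan l = pvSeqScan 0 l := by
  intro n
  induction n with
  | zero =>
    intro l h
    have : l = [] := List.eq_nil_of_length_eq_zero (Nat.le_zero.mp h)
    subst this
    simp [pvDcScan, pvSeqScan]
  | succ n ih =>
    intro l h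
    rw [pvDcScan]
    split_ifs with h1
    · match l, h1 with
      | [], _ => simp [pvSeqScan]
      | [x], _ => simp [pvSeqScan]
    · have hlen : 2 ≤ l.length := by omega
      have hm1 : 1 ≤ l.length / 2 := by omega
      have hm2 : l.length / 2 < l.length := by omega
      show pvDcScan (l.take (l.length / 2)) ++
          (pvDcScan (l.drop (l.length / 2))).map
            (fun r => (pvDcScan (l.take (l.length / 2))).getLastD 0 + r) = pvSeqScan 0 l
      rw [ih (l.take (l.length / 2)) (by simp only [List.length_take]; omega)]
      rw [ih (l.drop (l.length / 2)) (by simp only [List.length_drop]; omega)]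
      rw [pvSeq_last, zero_add]
      have : (pvSeqScan 0 (l.drop (l.length / 2))).map (fun r => (l.take (l.length / 2)).sum + r)
          = pvSeqScan ((l.take (l.length / 2)).sum) (l.drop (l.length / 2)) :=
        (pvSeq_shift _ _).symm
      rw [this]
      have happ := pvSeq_append (l.take (l.length / 2)) 0 (l.drop (l.length / 2))
      rw [zero_add] at happ
      rw [← happ, List.take_append_drop]

lemma pvDcScan_eq_seq (l : List Int) : pvDcScan l = pvSeqScan 0 l :=
  pvDcScan_eq_seq_aux l.length l le_rfl

lemma pvFold_zip_map (f : Int → Int) : ∀ (is ss : List Int) (d : PySem.Dict Int Int),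
    ((is.zip (ss.map f)).foldl (fun d (p : Int × Int) => d.insert p.1 p.2) d)
      = (is.zip ss).foldl (fun d (p : Int × Int) => d.insert p.1 (f p.2)) d := by
  intro is
  induction is with
  | nil => intro ss d; simp
  | cons i is ih =>
    intro ss d
    cases ss with
    | nil => simp
    | cons s ss => simp only [List.map, List.zip_cons_cons, List.foldl_cons]; rw [ih]

-- ===== VERDICT (by name: the statement is the Claim_ definition above) =====
theorem smooth_discrete_point_curve_py_spec : Claim_equal_smooth_discrete_point_curve_py := by
  intro obj limit asc_order _
  unfold Spec_smooth_discrete_point_curve_py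
  unfold smooth_discrete_point_curve_py smooth_discrete_point_curve_py_alt
  cases asc_order with
  | true =>
    simp only [if_true]
    rw [pvRange_pos ((limit + 1) - 0).toNat 0 (limit + 1) rfl]
    rw [pvMain 1 (Or.inl rfl) ((limit + 1) - 0).toNat 0 (PySem.Dict.mk obj)
        ((PySem.Dict.mk obj).getD (-1) 0) (by norm_num)]
    rw [pvDcScan_eq_seq, pvScan_eq_seq, pvSeq_shift]
    rw [pvFold_zip_map]
  | false =>
    simp only [Bool.false_eq_true, if_false]
    rw [pvRange_neg (limit - 0).toNat limit 0 rfl]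
    have h := pvMain (-1) (Or.inr rfl) (limit - 0).toNat limit (PySem.Dict.mk obj)
        ((PySem.Dict.mk obj).getD (limit + 1) 0) (by norm_num)
    simp only [sub_neg_eq_add] at h
    rw [h]
    rw [pvDcScan_eq_seq, pvScan_eq_seq, pvSeq_shift]
    rw [pvFold_zip_map]
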